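-- pv_equiv track=rewrite | github.com/broberr/STMProjectUPDATED | video_stm_activity/src/run_experiment.py | pick_closest_label
-- ===== SOURCE A (Python) =====
-- from typing import Dict, List, Tuple, Optional, Any
--
-- def pick_closest_label(scores: Dict[str, int]) -> str:
--     best_label, best_score = max(scores.items(), key=lambda kv: kv[1])
--     if best_score == 0:
--         return "using_computer"
--
--     specificity_order = ["video_call", "phone_use", "eating_drinking", "meeting", "using_computer"]
--     tied = [k for k, v in scores.items() if v == best_score]
--     for lab in specificity_order:
--         if lab in tied:
--             return lab
--     return best_label
-- ===== SOURCE B (Python) =====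
-- def pick_closest_label(scores):
--     specificity_order = ["video_call", "phone_use", "eating_drinking", "meeting", "using_computer"]
--     rank = {lab: len(specificity_order) - i for i, lab in enumerate(specificity_order)}
--     best_label, best_score = max(scores.items(), key=lambda kv: (kv[1], rank.get(kv[0], 0)))
--     return "using_computer" if best_score == 0 else best_label
-- ===== Notes on version B (the rewrite author's own statement) =====
-- stated objective: simpler
-- what changed: Replaces the three-stage pipeline (max by score, collect the tied list, re-scan the fixed specificity order) with a precomputed rank dict and a single max over the items under the composite key (score, rank), folding the specificity tie-break into the selection.
import Mathlib
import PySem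

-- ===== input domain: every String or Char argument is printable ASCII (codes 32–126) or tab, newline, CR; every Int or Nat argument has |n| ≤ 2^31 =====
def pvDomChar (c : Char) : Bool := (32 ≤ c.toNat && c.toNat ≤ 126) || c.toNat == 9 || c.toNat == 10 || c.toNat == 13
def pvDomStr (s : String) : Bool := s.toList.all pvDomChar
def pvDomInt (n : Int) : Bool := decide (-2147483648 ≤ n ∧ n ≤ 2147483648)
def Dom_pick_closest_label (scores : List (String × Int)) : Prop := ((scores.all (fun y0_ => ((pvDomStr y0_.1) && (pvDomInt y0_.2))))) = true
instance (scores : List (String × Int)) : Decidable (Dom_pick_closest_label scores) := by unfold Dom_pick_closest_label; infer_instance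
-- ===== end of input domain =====

-- B replaces A's three-stage pipeline (max by score, collect tied labels, re-scan
-- the fixed specificity order) with one max under the composite key (score, rank)
-- where rank is a precomputed specificity dict — simpler: one selection pass.

-- ===== PORT A =====
def pick_closest_label (scores : List (String × Int)) : String :=
  match PySem.List.max? scores (fun kv => kv.2) with
  | none => ""      -- Python: max() of an empty dict raises ValueError; excluded by Pre_
  | some best =>
    if best.2 == 0 then "using_computer"
    else
      let specificity_order : List String :=
        ["video_call", "phone_use", "eating_drinking", "meeting", "using_computer"]
      let tied := scores.foldl
        (fun acc kv => if kv.2 == best.2 then acc ++ [kv.1] else acc) ([] : List String)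
      match specificity_order.find? (fun lab => tied.contains lab) with
      | some lab => lab
      | none => best.1

-- ===== PORT B =====
def pick_closest_label_alt (scores : List (String × Int)) : String :=
  let specificity_order : List String :=
    ["video_call", "phone_use", "eating_drinking", "meeting", "using_computer"]
  let rank : PySem.Dict String Int :=
    PySem.Dict.ofList ((PySem.List.enumerate specificity_order).map
      (fun p => (p.2, (specificity_order.length : Int) - p.1)))
  match PySem.List.max2? scores (fun kv => kv.2) (fun kv => rank.getD kv.1 0) with
  | none => ""      -- Python: max() of an empty dict raises ValueError; excluded by Pre_
  | some best => if best.2 == 0 then "using_computer" else best.1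

-- ===== PRECONDITION & SPEC =====
-- Python's max raises ValueError on an empty dict, so Pre_ excludes only the empty list.
def Pre_pick_closest_label (scores : List (String × Int)) : Prop := scores ≠ []
instance (scores : List (String × Int)) : Decidable (Pre_pick_closest_label scores) := by
  unfold Pre_pick_closest_label; infer_instance
def pvWitness_pick_closest_label : (List (String × Int)) := [("phone_use", 2), ("x", 2)]

def Spec_pick_closest_label (scores : List (String × Int)) (out : String) : Prop :=
  out = pick_closest_label_alt scores
instance (scores : List (String × Int)) (out : String) : Decidable (Spec_pick_closest_label scores out) := by
  unfold Spec_pick_closest_label; infer_instance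

-- ===== CLAIM (what is proved, stated in full; the proofs are below) =====
def Claim_equal_pick_closest_label : Prop :=
  ∀ (scores : List (String × Int)), Dom_pick_closest_label scores →
    Pre_pick_closest_label scores →
    Spec_pick_closest_label scores (pick_closest_label scores)

-- ===== LEMMAS AND PROOFS =====

-- the specificity rank B's dict assigns (5 = most specific, 0 = not in the order)
def rfun (s : String) : Int :=
  if ("video_call" == s) then 5
  else if ("phone_use" == s) then 4
  else if ("eating_drinking" == s) then 3
  else if ("meeting" == s) then 2
  else if ("using_computer" == s) then 1
  else 0

lemma rfun_bounds (s : String) : 0 ≤ rfun s ∧ rfun s ≤ 5 := by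
  unfold rfun; split_ifs <;> norm_num

lemma rank_getD (s : String) :
    (PySem.Dict.ofList ((PySem.List.enumerate
        (["video_call", "phone_use", "eating_drinking", "meeting", "using_computer"] : List String)).map
      (fun p => (p.2, ((["video_call", "phone_use", "eating_drinking", "meeting", "using_computer"] : List String).length : Int) - p.1)))).getD s 0
    = rfun s := by
  have hd : (PySem.Dict.ofList ((PySem.List.enumerate
        (["video_call", "phone_use", "eating_drinking", "meeting", "using_computer"] : List String)).map
      (fun p => (p.2, ((["video_call", "phone_use", "eating_drinking", "meeting", "using_computer"] : List String).length : Int) - p.1))))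
      = PySem.Dict.mk [("video_call", (5 : Int)), ("phone_use", 4), ("eating_drinking", 3), ("meeting", 2), ("using_computer", 1)] := by
    decide
  rw [hd]
  unfold rfun
  cases h1 : ("video_call" == s)
  · cases h2 : ("phone_use" == s)
    · cases h3 : ("eating_drinking" == s)
      · cases h4 : ("meeting" == s)
        · cases h5 : ("using_computer" == s) <;>
            simp [PySem.Dict.getD, PySem.Dict.get?, List.find?, h1, h2, h3, h4, h5]
        · simp [PySem.Dict.getD, PySem.Dict.get?, List.find?, h1, h2, h3, h4]
      · simp [PySem.Dict.getD, PySem.Dict.get?, List.find?, h1, h2, h3]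
    · simp [PySem.Dict.getD, PySem.Dict.get?, List.find?, h1, h2]
  · simp [PySem.Dict.getD, PySem.Dict.get?, List.find?, h1]

-- the composite integer key that orders pairs exactly like (score, rank) lexicographically
def Kkey (kv : String × Int) : Int := 6 * kv.2 + rfun kv.1

lemma max?_cons {α κ : Type} [LT κ] [DecidableLT κ] (key : α → κ) (m : α) (xs : List α) :
    PySem.List.max? (m :: xs) key
      = some (xs.foldl (fun a x => if key a < key x then x else a) m) := by
  show List.foldl _ (some m) xs = _
  induction xs generalizing m with
  | nil => rfl
  | cons x xs ih =>
      simp only [List.foldl]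
      rw [show (if key m < key x then some x else some m)
            = some (if key m < key x then x else m) by split <;> rfl]
      exact ih _

lemma max2?_cons {α : Type} (k1 k2 : α → Int) (m : α) (xs : List α) :
    PySem.List.max2? (m :: xs) k1 k2
      = some (xs.foldl (fun a x =>
          if (decide (k1 a < k1 x) || (!decide (k1 x < k1 a) && decide (k2 a < k2 x))) then x else a) m) := by
  show List.foldl _ (some m) xs = _
  induction xs generalizing m with
  | nil => rfl
  | cons x xs ih =>
      simp only [List.foldl]
      rw [show (if (decide (k1 m < k1 x) || (!decide (k1 x < k1 m) && decide (k2 m < k2 x))) = true then some x else some m)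
            = some (if (decide (k1 m < k1 x) || (!decide (k1 x < k1 m) && decide (k2 m < k2 x))) = true then x else m) by split <;> rfl]
      exact ih _

-- B's lexicographic step coincides with the single-integer-key step under Kkey
lemma step_eq :
    (fun (a x : String × Int) =>
        if (decide (a.2 < x.2) || (!decide (x.2 < a.2) && decide (rfun a.1 < rfun x.1))) then x else a)
      = (fun a x => if Kkey a < Kkey x then x else a) := by
  funext a x
  have ha := rfun_bounds a.1
  have hx := rfun_bounds x.1
  have hcond : (decide (a.2 < x.2) || (!decide (x.2 < a.2) && decide (rfun a.1 < rfun x.1))) = true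
      ↔ Kkey a < Kkey x := by
    simp only [Bool.or_eq_true, Bool.and_eq_true, Bool.not_eq_eq_eq_not, Bool.not_true,
      decide_eq_true_eq, decide_eq_false_iff_not, Kkey]
    omega
  split_ifs with h1 h2 h2
  · rfl
  · exact absurd (hcond.mp h1) h2
  · exact absurd (hcond.mpr h2) h1
  · rfl

-- first-argmax characterisation of the running-max fold
lemma argmax_split {α : Type} (K : α → Int) :
    ∀ (xs : List α) (m res : α),
      xs.foldl (fun a x => if K a < K x then x else a) m = res →
      (res = m ∧ ∀ y ∈ xs, K y ≤ K m)
      ∨ (∃ pre post, xs = pre ++ res :: post ∧ K m < K res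
          ∧ (∀ y ∈ pre, K y < K res) ∧ (∀ y ∈ post, K y ≤ K res)) := by
  intro xs
  induction xs with
  | nil =>
      intro m res h
      left
      simpa using h.symm
  | cons x xs ih =>
      intro m res h
      simp only [List.foldl] at h
      by_cases hx : K m < K x
      · rw [if_pos hx] at h
        rcases ih x res h with ⟨rfl, hall⟩ | ⟨pre, post, hsplit, hlt, hpre, hpost⟩
        · right; exact ⟨[], xs, by simp, hx, by simp, hall⟩
        · right
          refine ⟨x :: pre, post, by simp [hsplit], lt_trans hx hlt, ?_, hpost⟩
          intro y hy
          rcases List.mem_cons.mp hy with rfl | hy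
          · exact hlt
          · exact hpre y hy
      · rw [if_neg hx] at h
        rcases ih m res h with ⟨rfl, hall⟩ | ⟨pre, post, hsplit, hlt, hpre, hpost⟩
        · left
          refine ⟨rfl, ?_⟩
          intro y hy
          rcases List.mem_cons.mp hy with rfl | hy
          · exact le_of_not_gt hx
          · exact hall y hy
        · right
          refine ⟨x :: pre, post, by simp [hsplit], hlt, ?_, hpost⟩
          intro y hy
          rcases List.mem_cons.mp hy with rfl | hy
          · exact lt_of_le_of_lt (le_of_not_gt hx) hlt
          · exact hpre y hy

-- on a nonempty list the running max from the head is the FIRST maximal element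
lemma argmax_cons {α : Type} (K : α → Int) (s0 : α) (rest : List α) :
    ∃ pre post, s0 :: rest = pre ++ (rest.foldl (fun a x => if K a < K x then x else a) s0) :: post
      ∧ (∀ y ∈ pre, K y < K (rest.foldl (fun a x => if K a < K x then x else a) s0))
      ∧ (∀ y ∈ post, K y ≤ K (rest.foldl (fun a x => if K a < K x then x else a) s0)) := by
  set res := rest.foldl (fun a x => if K a < K x then x else a) s0 with hres
  rcases argmax_split K rest s0 res hres.symm with ⟨heq, hall⟩ | ⟨pre, post, hsplit, hlt, hpre, hpost⟩
  · refine ⟨[], rest, ?_, by simp, ?_⟩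
    · rw [heq]; rfl
    · rw [heq]; exact hall
  · refine ⟨s0 :: pre, post, ?_, ?_, hpost⟩
    · rw [hsplit]; rfl
    · intro y hy
      rcases List.mem_cons.mp hy with rfl | hy
      · exact hlt
      · exact hpre y hy

lemma le_of_argmax_mem {α : Type} (K : α → Int) {xs pre post : List α} {res y : α}
    (hsplit : xs = pre ++ res :: post)
    (hpre : ∀ z ∈ pre, K z < K res) (hpost : ∀ z ∈ post, K z ≤ K res)
    (hy : y ∈ xs) : K y ≤ K res := by
  rw [hsplit] at hy
  rcases List.mem_append.mp hy with h | h
  · exact le_of_lt (hpre y h)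
  · rcases List.mem_cons.mp h with rfl | h
    · exact le_refl _
    · exact hpost y h

lemma mem_of_split {α : Type} {xs pre post : List α} {res : α}
    (hsplit : xs = pre ++ res :: post) : res ∈ xs := by
  rw [hsplit]; exact List.mem_append.mpr (Or.inr (List.mem_cons_self ..))

-- two "first element with property" splits of the same list: one is in the other's prefix or they coincide
lemma split_trichotomy {α : Type} :
    ∀ (p1 : List α) (p2 s1 s2 : List α) (a b : α),
      p1 ++ a :: s1 = p2 ++ b :: s2 → a = b ∨ a ∈ p2 ∨ b ∈ p1 := by
  intro p1
  induction p1 with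
  | nil =>
      intro p2 s1 s2 a b h
      cases p2 with
      | nil =>
          left
          exact (List.cons.injEq .. ▸ h).1
      | cons h2 t2 =>
          right; left
          have : a = h2 := (List.cons.injEq .. ▸ h).1
          simp [this]
  | cons x t ih =>
      intro p2 s1 s2 a b h
      cases p2 with
      | nil =>
          right; right
          have : b = x := ((List.cons.injEq .. ▸ h).1).symm
          simp [this]
      | cons h2 t2 =>
          have ht : t ++ a :: s1 = t2 ++ b :: s2 := (List.cons.injEq .. ▸ h).2
          rcases ih t2 s1 s2 a b ht with h' | h' | h'
          · exact Or.inl h'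
          · exact Or.inr (Or.inl (List.mem_cons_of_mem _ h'))
          · exact Or.inr (Or.inr (List.mem_cons_of_mem _ h'))

lemma tied_mem (scores : List (String × Int)) (M : Int) (lab : String) :
    lab ∈ scores.foldl (fun acc kv => if kv.2 == M then acc ++ [kv.1] else acc) ([] : List String)
      ↔ ∃ y ∈ scores, y.2 = M ∧ y.1 = lab := by
  rw [PySem.List.foldl_append_if]
  simp only [List.nil_append, List.mem_map, List.mem_filter, beq_iff_eq]
  constructor
  · rintro ⟨y, ⟨hy, hM⟩, hl⟩; exact ⟨y, hy, hM, hl⟩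
  · rintro ⟨y, hy, hM, hl⟩; exact ⟨y, ⟨hy, hM⟩, hl⟩

-- every label of the specificity order has positive rank
lemma rfun_pos_of_mem :
    ∀ lab ∈ (["video_call", "phone_use", "eating_drinking", "meeting", "using_computer"] : List String),
      1 ≤ rfun lab := by decide

lemma A_eval (s0 : String × Int) (rest : List (String × Int)) :
    pick_closest_label (s0 :: rest) =
      (if (rest.foldl (fun a x => if a.2 < x.2 then x else a) s0).2 == 0 then "using_computer"
       else
         match (["video_call", "phone_use", "eating_drinking", "meeting", "using_computer"] : List String).find?
             (fun lab => ((s0 :: rest).foldl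
               (fun acc kv => if kv.2 == (rest.foldl (fun a x => if a.2 < x.2 then x else a) s0).2
                 then acc ++ [kv.1] else acc) ([] : List String)).contains lab) with
         | some lab => lab
         | none => (rest.foldl (fun a x => if a.2 < x.2 then x else a) s0).1) := by
  unfold pick_closest_label
  rw [max?_cons]

lemma B_eval (s0 : String × Int) (rest : List (String × Int)) :
    pick_closest_label_alt (s0 :: rest) =
      (if (rest.foldl (fun a x => if Kkey a < Kkey x then x else a) s0).2 == 0 then "using_computer"
       else (rest.foldl (fun a x => if Kkey a < Kkey x then x else a) s0).1) := by
  show (match PySem.List.max2? (s0 :: rest) (fun kv => kv.2)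
      (fun kv => (PySem.Dict.ofList ((PySem.List.enumerate
        (["video_call", "phone_use", "eating_drinking", "meeting", "using_computer"] : List String)).map
      (fun p => (p.2, ((["video_call", "phone_use", "eating_drinking", "meeting", "using_computer"] : List String).length : Int) - p.1)))).getD kv.1 0) with
    | none => ""
    | some best => if best.2 == 0 then "using_computer" else best.1) = _
  rw [max2?_cons]
  simp only [rank_getD, step_eq]

-- ===== VERDICT (by name: the statement is the Claim_ definition above) =====
theorem pick_closest_label_spec : Claim_equal_pick_closest_label := by
  intro scores _hdom hpre
  unfold Spec_pick_closest_label
  obtain ⟨s0, rest, rfl⟩ : ∃ s0 rest, scores = s0 :: rest := by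
    cases scores with
    | nil => exact absurd rfl hpre
    | cons a l => exact ⟨a, l, rfl⟩
  rw [A_eval, B_eval]
  set b := rest.foldl (fun a x => if a.2 < x.2 then x else a) s0 with hb
  set c := rest.foldl (fun a x => if Kkey a < Kkey x then x else a) s0 with hc
  obtain ⟨preb, postb, hsb, hpreb, hpostb⟩ := argmax_cons (fun kv : String × Int => kv.2) s0 rest
  obtain ⟨prec, postc, hsc, hprec, hpostc⟩ := argmax_cons Kkey s0 rest
  rw [← hb] at hsb hpreb hpostb
  rw [← hc] at hsc hprec hpostc
  have hbmem : b ∈ s0 :: rest := mem_of_split hsb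
  have hcmem : c ∈ s0 :: rest := mem_of_split hsc
  have hKle : ∀ y ∈ s0 :: rest, Kkey y ≤ Kkey c := fun y hy => le_of_argmax_mem Kkey hsc hprec hpostc hy
  have hSle : ∀ y ∈ s0 :: rest, y.2 ≤ b.2 := fun y hy => le_of_argmax_mem (fun kv : String × Int => kv.2) hsb hpreb hpostb hy
  have hrb := rfun_bounds b.1
  have hrc := rfun_bounds c.1
  have hKbc := hKle b hbmem
  have hScb := hSle c hcmem
  have hcb : c.2 = b.2 := by unfold Kkey at hKbc; omega
  rw [hcb]
  by_cases hb0 : b.2 = 0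
  · simp [hb0]
  · have hb0' : (b.2 == 0) = false := by simpa using hb0
    simp only [hb0', Bool.false_eq_true, if_false]
    set tl := (s0 :: rest).foldl
      (fun acc kv => if kv.2 == b.2 then acc ++ [kv.1] else acc) ([] : List String) with htl
    have hcont : ∀ lab : String, tl.contains lab = true ↔ ∃ y ∈ s0 :: rest, y.2 = b.2 ∧ y.1 = lab := by
      intro lab
      rw [List.contains_iff_mem, htl, tied_mem]
    have hnotin : ∀ lab : String, rfun c.1 < rfun lab → ¬ (∃ y ∈ s0 :: rest, y.2 = b.2 ∧ y.1 = lab) := by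
      rintro lab hlt ⟨y, hy, hyb, rfl⟩
      have hKy := hKle y hy
      unfold Kkey at hKy
      omega
    have hcin : ∃ y ∈ s0 :: rest, y.2 = b.2 ∧ y.1 = c.1 := ⟨c, hcmem, hcb, rfl⟩
    have hpt : ∀ lab : String, (∃ y ∈ s0 :: rest, y.2 = b.2 ∧ y.1 = lab) → lab ∈ tl :=
      fun lab h => List.contains_iff_mem.mp ((hcont lab).mpr h)
    have hpf : ∀ lab : String, rfun c.1 < rfun lab → lab ∉ tl :=
      fun lab h hm => (hnotin lab h) ((hcont lab).mp (List.contains_iff_mem.mpr hm))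
    by_cases hc0 : rfun c.1 = 0
    · have hnone : (["video_call", "phone_use", "eating_drinking", "meeting", "using_computer"] : List String).find?
          (fun lab => tl.contains lab) = none := by
        rw [List.find?_eq_none]
        intro lab hlab hcontr
        exact hnotin lab (by have := rfun_pos_of_mem lab hlab; omega) ((hcont lab).mp hcontr)
      rw [hnone]
      rcases split_trichotomy preb prec postb postc b c (hsb.symm.trans hsc) with heq | hbc | hcb2
      · rw [heq]
      · have := hprec b hbc
        unfold Kkey at this
        omega
      · have := hpreb c hcb2
        omega
    · have hmem5 : "video_call" = c.1 ∨ "phone_use" = c.1 ∨ "eating_drinking" = c.1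
          ∨ "meeting" = c.1 ∨ "using_computer" = c.1 := by
        by_contra hne
        push Not at hne
        obtain ⟨n1, n2, n3, n4, n5⟩ := hne
        apply hc0
        unfold rfun
        rw [if_neg (by simpa using n1), if_neg (by simpa using n2), if_neg (by simpa using n3),
          if_neg (by simpa using n4), if_neg (by simpa using n5)]
      rcases hmem5 with e | e | e | e | e
      · have ht : "video_call" ∈ tl := hpt _ (e ▸ hcin)
        rw [show (["video_call", "phone_use", "eating_drinking", "meeting", "using_computer"] : List String).find?
            (fun lab => tl.contains lab) = some "video_call" from by simp [List.find?, ht]]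
        exact e
      · have ht : "phone_use" ∈ tl := hpt _ (e ▸ hcin)
        have hf1 : "video_call" ∉ tl := hpf _ (by rw [← e]; decide)
        rw [show (["video_call", "phone_use", "eating_drinking", "meeting", "using_computer"] : List String).find?
            (fun lab => tl.contains lab) = some "phone_use" from by simp [List.find?, hf1, ht]]
        exact e
      · have ht : "eating_drinking" ∈ tl := hpt _ (e ▸ hcin)
        have hf1 : "video_call" ∉ tl := hpf _ (by rw [← e]; decide)
        have hf2 : "phone_use" ∉ tl := hpf _ (by rw [← e]; decide)
        rw [show (["video_call", "phone_use", "eating_drinking", "meeting", "using_computer"] : List String).find?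
            (fun lab => tl.contains lab) = some "eating_drinking" from by simp [List.find?, hf1, hf2, ht]]
        exact e
      · have ht : "meeting" ∈ tl := hpt _ (e ▸ hcin)
        have hf1 : "video_call" ∉ tl := hpf _ (by rw [← e]; decide)
        have hf2 : "phone_use" ∉ tl := hpf _ (by rw [← e]; decide)
        have hf3 : "eating_drinking" ∉ tl := hpf _ (by rw [← e]; decide)
        rw [show (["video_call", "phone_use", "eating_drinking", "meeting", "using_computer"] : List String).find?
            (fun lab => tl.contains lab) = some "meeting" from by simp [List.find?, hf1, hf2, hf3, ht]]
        exact e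
      · have ht : "using_computer" ∈ tl := hpt _ (e ▸ hcin)
        have hf1 : "video_call" ∉ tl := hpf _ (by rw [← e]; decide)
        have hf2 : "phone_use" ∉ tl := hpf _ (by rw [← e]; decide)
        have hf3 : "eating_drinking" ∉ tl := hpf _ (by rw [← e]; decide)
        have hf4 : "meeting" ∉ tl := hpf _ (by rw [← e]; decide)
        rw [show (["video_call", "phone_use", "eating_drinking", "meeting", "using_computer"] : List String).find?
            (fun lab => tl.contains lab) = some "using_computer" from by simp [List.find?, hf1, hf2, hf3, hf4, ht]]
        exact e
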